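-- pv_equiv track=rewrite | github.com/pypi-data/pypi-mirror-396 | packages/mitsuki/mitsuki-0.1.4.tar.gz/mitsuki-0.1.4/mitsuki/web/multipart.py | _parse_content_disposition
-- ===== SOURCE A (Python) =====
-- from typing import Dict, List, Optional, Tuple
--
-- def _parse_content_disposition(disposition: str) -> Tuple[str, Optional[str]]:
--     """
--     Parse Content-Disposition header to extract name and filename.
--
--     Returns:
--         Tuple of (name, filename). filename is None for regular fields.
--     """
--     name = None
--     filename = None
--
--     # Simple parsing: form-data; name="field"; filename="file.txt"
--     parts = disposition.split(";")
--     for part in parts: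
--         part = part.strip()
--         if part.startswith("name="):
--             name = part[5:].strip('"')
--         elif part.startswith("filename="):
--             filename = part[9:].strip('"')
--
--     return name or "", filename
-- ===== SOURCE B (Python) =====
-- def _parse_content_disposition(disposition):
--     params = {}
--     for part in disposition.split(";"):
--         part = part.strip()
--         if "=" in part:
--             key, value = part.split("=", 1)
--             params[key] = value.strip('"')
--     name = params.get("name")
--     filename = params.get("filename")
--     return (name or "", filename)
-- ===== Notes on version B (the rewrite author's own statement) =====
-- stated objective: alternative
-- what changed: B replaces A's inline per-part prefix tests updating two mutable variables with a build-a-map-then-lookup decomposition: each semicolon part containing an equals sign is split once at its first occurrence and stored as key/unquoted value in a dict (last assignment wins), after which the two fields are read with two lookups.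
import Mathlib
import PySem

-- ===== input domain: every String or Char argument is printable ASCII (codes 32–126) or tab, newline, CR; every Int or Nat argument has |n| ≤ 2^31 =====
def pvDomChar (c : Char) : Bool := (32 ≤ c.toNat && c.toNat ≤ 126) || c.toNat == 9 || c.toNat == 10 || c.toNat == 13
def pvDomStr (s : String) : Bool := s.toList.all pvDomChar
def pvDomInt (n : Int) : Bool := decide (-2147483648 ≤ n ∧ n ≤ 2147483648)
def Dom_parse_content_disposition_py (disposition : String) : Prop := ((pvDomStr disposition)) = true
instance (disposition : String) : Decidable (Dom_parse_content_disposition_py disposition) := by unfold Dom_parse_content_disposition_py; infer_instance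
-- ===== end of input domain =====

-- B builds a key→value dict from the '='-parts and then looks up 'name'/'filename', instead of A's
-- inline per-part prefix tests updating two variables; same cost, different decomposition.

-- Python `x or ""` on a str-or-None x (the shared final step of both Pythons)
def pvTruthy (s : Option String) : String := match s with | none => "" | some s => if s = "" then "" else s

-- ===== PORT A =====
-- loop body of A: two mutable variables (name, filename), prefix tests in A's branch order
def pvStepA (st : Option String × Option String) (part : String) : Option String × Option String :=
  let part := PySem.Str.strip part
  if PySem.Str.startswith part "name=" then
    (some (PySem.Str.stripChars (PySem.Str.slice part (some 5) none) "\""), st.2)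
  else if PySem.Str.startswith part "filename=" then
    (st.1, some (PySem.Str.stripChars (PySem.Str.slice part (some 9) none) "\""))
  else st

def parse_content_disposition_py (disposition : String) : String × Option String :=
  -- the separator ";" is a nonempty literal, so Python's split never raises: split? is `some`
  let parts := (PySem.Str.split? disposition ";").getD []
  let st := parts.foldl pvStepA (none, none)
  (pvTruthy st.1, st.2)

-- ===== PORT B =====
-- loop body of B: if '=' occurs, split once at the first '=' and store key → value.strip('"')
def pvStepB (d : PySem.Dict String String) (part : String) : PySem.Dict String String :=
  let part := PySem.Str.strip part
  if PySem.Str.isIn "=" part then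
    match PySem.Str.splitMax? part "=" 1 with
    | some [key, value] => d.insert key (PySem.Str.stripChars value "\"")
    | _ => d   -- unreachable: '=' in part guarantees a 2-element split
  else d

def parse_content_disposition_py_alt (disposition : String) : String × Option String :=
  let params := ((PySem.Str.split? disposition ";").getD []).foldl pvStepB PySem.Dict.empty
  let name := params.get? "name"
  let filename := params.get? "filename"
  (pvTruthy name, filename)

-- ===== PRECONDITION & SPEC =====
def Spec_parse_content_disposition_py (disposition : String) (out : String × Option String) : Prop := out = parse_content_disposition_py_alt disposition
instance (disposition : String) (out : String × Option String) : Decidable (Spec_parse_content_disposition_py disposition out) := by unfold Spec_parse_content_disposition_py; infer_instance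

-- ===== CLAIM (what is proved, stated in full; the proofs are below) =====
def Claim_equal_parse_content_disposition_py : Prop := ∀ (disposition : String), Dom_parse_content_disposition_py disposition → Spec_parse_content_disposition_py disposition (parse_content_disposition_py disposition)

-- ===== LEMMAS AND PROOFS =====

-- splitOnMax.go with maxsplit 0 returns the remainder as the single last piece
theorem pv_go_zero (fuel : Nat) (l cur : List Char) (acc : List (List Char)) :
    PySem.Chars.splitOnMax.go ['='] (fuel + 1) 0 l cur acc = ((cur.reverse ++ l) :: acc).reverse := by
  cases l <;> simp [PySem.Chars.splitOnMax.go]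

-- splitOnMax.go with maxsplit 1: split at the first '=' if any
theorem pv_go_one (l : List Char) : ∀ (fuel : Nat) (cur : List Char) (acc : List (List Char)),
    l.length ≤ fuel →
    PySem.Chars.splitOnMax.go ['='] (fuel + 1) 1 l cur acc = acc.reverse ++
      (if '=' ∈ l then [cur.reverse ++ l.takeWhile (· ≠ '='), (l.dropWhile (· ≠ '=')).drop 1]
       else [cur.reverse ++ l]) := by
  induction l with
  | nil => intro fuel cur acc _; simp [PySem.Chars.splitOnMax.go]
  | cons c t ih =>
    intro fuel cur acc hlen
    obtain ⟨f, rfl⟩ : ∃ f, fuel = f + 1 := ⟨fuel - 1, by simp at hlen; omega⟩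
    rw [PySem.Chars.splitOnMax.go.eq_def]
    by_cases hc : c = '='
    · subst hc
      simp only [List.isPrefixOf, BEq.rfl, Bool.true_and, if_true]
      rw [show (1 : Nat) - 1 = 0 from rfl]
      simp [pv_go_zero, List.takeWhile, List.dropWhile]
    · have hpre : ['='].isPrefixOf (c :: t) = false := by
        simp [List.isPrefixOf]; exact fun h => hc h.symm
      simp only [hpre, Bool.false_eq_true, if_false, one_ne_zero]
      rw [ih f (c :: cur) acc (by simp at hlen; omega)]
      simp [hc, Ne.symm hc]

-- characterization of part.split("=", 1) at the char-list level
theorem pv_splitOnMax_one (l : List Char) :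
    PySem.Chars.splitOnMax l ['='] 1 =
      (if '=' ∈ l then [l.takeWhile (· ≠ '='), (l.dropWhile (· ≠ '=')).drop 1]
       else [l]) := by
  rw [show PySem.Chars.splitOnMax l ['='] 1
      = PySem.Chars.splitOnMax.go ['='] (l.length + 1) 1 l [] [] from rfl]
  rw [pv_go_one l l.length [] [] le_rfl]
  split <;> simp

-- part.split("=", 1) at the String level, when '=' occurs
theorem pv_splitMax_str (q : String) (h : '=' ∈ q.toList) :
    ∃ K V : String, PySem.Str.splitMax? q "=" 1 = some [K, V] ∧
      K.toList = q.toList.takeWhile (· ≠ '=') ∧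
      V.toList = (q.toList.dropWhile (· ≠ '=')).drop 1 := by
  have hm := PySem.Str.splitMax?_map q "=" 1
  rw [show ("=".toList) = ['='] from rfl] at hm
  rw [show PySem.Chars.splitMax? q.toList ['='] 1
      = some (PySem.Chars.splitOnMax q.toList ['='] 1) from rfl] at hm
  rw [pv_splitOnMax_one, if_pos h] at hm
  cases hsp : PySem.Str.splitMax? q "=" 1 with
  | none => rw [hsp] at hm; simp at hm
  | some xs =>
    rw [hsp] at hm
    simp only [Option.map_some, Option.some.injEq] at hm
    obtain ⟨K, xs, rfl⟩ : ∃ K t, xs = K :: t := by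
      cases xs with | nil => simp at hm | cons a b => exact ⟨a, b, rfl⟩
    obtain ⟨V, xs, rfl⟩ : ∃ V t, xs = V :: t := by
      cases xs with | nil => simp at hm | cons a b => exact ⟨a, b, rfl⟩
    obtain rfl : xs = [] := by
      cases xs with | nil => rfl | cons a b => simp at hm
    simp only [List.map_cons, List.map_nil, List.cons.injEq, and_true] at hm
    exact ⟨K, V, rfl, hm.1, hm.2⟩

theorem pv_dropWhile_eq (l : List Char) (h : '=' ∈ l) :
    l.dropWhile (· ≠ '=') = '=' :: (l.dropWhile (· ≠ '=')).drop 1 := by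
  induction l with
  | nil => simp at h
  | cons c t ih =>
    by_cases hc : c = '='
    · subst hc; simp
    · rcases List.mem_cons.mp h with h' | h'
      · exact absurd h'.symm hc
      · simpa [List.dropWhile_cons, hc] using ih h'

-- decomposition of a part at its first '='
theorem pv_decomp (l : List Char) (h : '=' ∈ l) :
    l = l.takeWhile (· ≠ '=') ++ '=' :: (l.dropWhile (· ≠ '=')).drop 1 := by
  conv_lhs => rw [← List.takeWhile_append_dropWhile (p := (· ≠ '=')) (l := l)]
  rw [← pv_dropWhile_eq l h]

theorem pv_sw (q pre : String) : PySem.Str.startswith q pre = true ↔ pre.toList <+: q.toList := by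
  rw [PySem.Str.startswith_eq]; exact PySem.Chars.startswith_iff _ _

theorem pv_isin (q : String) : PySem.Str.isIn "=" q = true ↔ '=' ∈ q.toList := by
  rw [PySem.Str.isIn_eq, show ("=".toList) = ['='] from rfl, PySem.Chars.isIn_iff_infix]
  exact List.singleton_infix_iff '=' q.toList

-- one step of the two loops preserves the correspondence:
-- B's dict holds under "name"/"filename" exactly A's two variables
theorem pv_step (s : Option String × Option String) (d : PySem.Dict String String) (part : String)
    (h1 : d.get? "name" = s.1) (h2 : d.get? "filename" = s.2) :
    (pvStepB d part).get? "name" = (pvStepA s part).1 ∧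
    (pvStepB d part).get? "filename" = (pvStepA s part).2 := by
  simp only [pvStepA, pvStepB]
  generalize PySem.Str.strip part = q
  by_cases hn : PySem.Str.startswith q "name=" = true
  · obtain ⟨r, hr⟩ := (pv_sw q "name=").mp hn
    have hr' : q.toList = ['n','a','m','e','='] ++ r := by rw [← hr]; rfl
    have hmem : '=' ∈ q.toList := by rw [hr']; simp
    have htake : q.toList.takeWhile (· ≠ '=') = ['n','a','m','e'] := by rw [hr']; rfl
    have hdrop1 : (q.toList.dropWhile (· ≠ '=')).drop 1 = r := by rw [hr']; rfl
    have hdrop5 : q.toList.drop 5 = r := by rw [hr']; rfl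
    obtain ⟨K, V, hsp, hK, hV⟩ := pv_splitMax_str q hmem
    have hKs : K = "name" := String.toList_inj.mp (by rw [hK, htake]; rfl)
    subst hKs
    have hin : PySem.Str.isIn "=" q = true := (pv_isin q).mpr hmem
    have hval : PySem.Str.stripChars V "\"" = PySem.Str.stripChars (PySem.Str.slice q (some 5) none) "\"" := by
      apply String.toList_inj.mp
      rw [PySem.Str.toList_stripChars, PySem.Str.toList_stripChars, PySem.Str.toList_slice,
          PySem.Chars.slice_eq_listSlice, PySem.List.slice_from _ (by norm_num)]
      rw [hV, hdrop1, show ((5:Int).toNat) = 5 from rfl, hdrop5]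
    rw [if_pos hn, if_pos hin, hsp]
    constructor
    · rw [PySem.Dict.get?_insert_self, hval]
    · rw [PySem.Dict.get?_insert_of_ne _ _ (by decide), h2]
  · by_cases hf : PySem.Str.startswith q "filename=" = true
    · obtain ⟨r, hr⟩ := (pv_sw q "filename=").mp hf
      have hr' : q.toList = ['f','i','l','e','n','a','m','e','='] ++ r := by rw [← hr]; rfl
      have hmem : '=' ∈ q.toList := by rw [hr']; simp
      have htake : q.toList.takeWhile (· ≠ '=') = ['f','i','l','e','n','a','m','e'] := by rw [hr']; rfl
      have hdrop1 : (q.toList.dropWhile (· ≠ '=')).drop 1 = r := by rw [hr']; rfl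
      have hdrop9 : q.toList.drop 9 = r := by rw [hr']; rfl
      obtain ⟨K, V, hsp, hK, hV⟩ := pv_splitMax_str q hmem
      have hKs : K = "filename" := String.toList_inj.mp (by rw [hK, htake]; rfl)
      subst hKs
      have hin : PySem.Str.isIn "=" q = true := (pv_isin q).mpr hmem
      have hval : PySem.Str.stripChars V "\"" = PySem.Str.stripChars (PySem.Str.slice q (some 9) none) "\"" := by
        apply String.toList_inj.mp
        rw [PySem.Str.toList_stripChars, PySem.Str.toList_stripChars, PySem.Str.toList_slice,
            PySem.Chars.slice_eq_listSlice, PySem.List.slice_from _ (by norm_num)]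
        rw [hV, hdrop1, show ((9:Int).toNat) = 9 from rfl, hdrop9]
      rw [if_neg hn, if_pos hf, if_pos hin, hsp]
      constructor
      · rw [PySem.Dict.get?_insert_of_ne _ _ (by decide), h1]
      · rw [PySem.Dict.get?_insert_self, hval]
    · rw [if_neg hn, if_neg hf]
      by_cases hmem : '=' ∈ q.toList
      · obtain ⟨K, V, hsp, hK, hV⟩ := pv_splitMax_str q hmem
        have hd := pv_decomp q.toList hmem
        have hKn : K ≠ "name" := by
          intro hKs
          apply hn
          refine (pv_sw q "name=").mpr ⟨(q.toList.dropWhile (· ≠ '=')).drop 1, ?_⟩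
          rw [show ("name=".toList) = "name".toList ++ ['='] from rfl]
          rw [show ("name".toList) = q.toList.takeWhile (· ≠ '=') from by rw [← hK, hKs]]
          rw [List.append_assoc, List.singleton_append, ← hd]
        have hKf : K ≠ "filename" := by
          intro hKs
          apply hf
          refine (pv_sw q "filename=").mpr ⟨(q.toList.dropWhile (· ≠ '=')).drop 1, ?_⟩
          rw [show ("filename=".toList) = "filename".toList ++ ['='] from rfl]
          rw [show ("filename".toList) = q.toList.takeWhile (· ≠ '=') from by rw [← hK, hKs]]
          rw [List.append_assoc, List.singleton_append, ← hd]
        have hin : PySem.Str.isIn "=" q = true := (pv_isin q).mpr hmem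
        rw [if_pos hin, hsp]
        exact ⟨by rw [PySem.Dict.get?_insert_of_ne _ _ (Ne.symm hKn), h1],
               by rw [PySem.Dict.get?_insert_of_ne _ _ (Ne.symm hKf), h2]⟩
      · have hin : PySem.Str.isIn "=" q ≠ true := fun h => hmem ((pv_isin q).mp h)
        rw [if_neg hin]
        exact ⟨h1, h2⟩

theorem pv_loop (parts : List String) : ∀ (s : Option String × Option String) (d : PySem.Dict String String),
    d.get? "name" = s.1 → d.get? "filename" = s.2 →
    (parts.foldl pvStepB d).get? "name" = (parts.foldl pvStepA s).1 ∧
    (parts.foldl pvStepB d).get? "filename" = (parts.foldl pvStepA s).2 := by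
  induction parts with
  | nil => intro s d h1 h2; exact ⟨h1, h2⟩
  | cons p t ih =>
    intro s d h1 h2
    have hs := pv_step s d p h1 h2
    simp only [List.foldl_cons]
    exact ih (pvStepA s p) (pvStepB d p) hs.1 hs.2

-- ===== VERDICT (by name: the statement is the Claim_ definition above) =====
theorem parse_content_disposition_py_spec : Claim_equal_parse_content_disposition_py := by
  intro disposition _
  have h := pv_loop ((PySem.Str.split? disposition ";").getD []) (none, none) PySem.Dict.empty
    (PySem.Dict.get?_empty "name") (PySem.Dict.get?_empty "filename")
  show (pvTruthy (List.foldl pvStepA (none, none) ((PySem.Str.split? disposition ";").getD [])).1,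
        (List.foldl pvStepA (none, none) ((PySem.Str.split? disposition ";").getD [])).2) =
       (pvTruthy ((List.foldl pvStepB PySem.Dict.empty ((PySem.Str.split? disposition ";").getD [])).get? "name"),
        (List.foldl pvStepB PySem.Dict.empty ((PySem.Str.split? disposition ";").getD [])).get? "filename")
  rw [h.1, h.2]
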